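-- pv_equiv track=rewrite | github.com/Bendemeurichy/scripting2022 | week3/dronken_mier.py | rooster
-- ===== SOURCE A (Python) =====
-- def rooster(grootte, seq):
--     assert grootte ** 2 == len(seq), "ongeldige argumenten"
--     res = []
--     i = 0
--     for _ in range(grootte):
--         res.append(seq[i:i + len(seq) // grootte])
--         i += len(seq) // grootte
--     return [list(el) for el in res]
-- ===== SOURCE B (Python) =====
-- def rooster(grootte, seq):
--     assert grootte ** 2 == len(seq), "ongeldige argumenten"
--     it = iter(seq)
--     return [list(t) for t in zip(*[it] * grootte)]
-- ===== Notes on version B (the rewrite author's own statement) =====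
-- stated objective: idiomatic
-- what changed: Replaces the index-arithmetic loop that slices seq at computed offsets with the standard iterator-grouper idiom zip(*[iter(seq)]*grootte), which groups consecutive elements from one shared iterator.
import Mathlib
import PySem

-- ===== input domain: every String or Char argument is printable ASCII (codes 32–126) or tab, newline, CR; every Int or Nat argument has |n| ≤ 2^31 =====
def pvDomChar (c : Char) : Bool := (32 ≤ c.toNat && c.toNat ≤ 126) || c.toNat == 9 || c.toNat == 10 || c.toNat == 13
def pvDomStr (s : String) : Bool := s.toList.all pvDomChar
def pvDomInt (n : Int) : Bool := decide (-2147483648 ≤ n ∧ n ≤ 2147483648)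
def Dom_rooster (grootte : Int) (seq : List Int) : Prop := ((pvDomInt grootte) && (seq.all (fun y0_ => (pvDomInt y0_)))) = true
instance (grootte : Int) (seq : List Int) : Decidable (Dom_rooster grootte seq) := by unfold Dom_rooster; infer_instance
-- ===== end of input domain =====

-- B replaces the index-arithmetic slicing loop with the iterator-grouper idiom
-- (zip over one shared iterator), ported as consecutive take/drop chunking.

-- ===== PORT A =====
-- for _ in range(grootte): res.append(seq[i:i+len(seq)//grootte]); i += len(seq)//grootte
def rooster (grootte : Int) (seq : List Int) : List (List Int) :=
  let d := PySem.Int.floordiv (seq.length : Int) grootte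
  let st := (PySem.List.pyRange 0 grootte 1).foldl
    (fun (s : List (List Int) × Int) _ =>
      (s.1 ++ [PySem.List.slice seq (some s.2) (some (s.2 + d))], s.2 + d))
    ([], 0)
  st.1.map (fun el => el)

-- ===== PORT B =====
-- zip(*[iter(seq)]*grootte): repeatedly take grootte consecutive elements while enough remain
def chunksB (n : Nat) (xs : List Int) : List (List Int) :=
  if _h : 0 < n ∧ n ≤ xs.length then xs.take n :: chunksB n (xs.drop n) else []
termination_by xs.length
decreasing_by simp; omega

def rooster_alt (grootte : Int) (seq : List Int) : List (List Int) :=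
  (chunksB grootte.toNat seq).map (fun t => t)

-- ===== PRECONDITION & SPEC =====
-- Pre_ is exactly A's assert 'grootte ** 2 == len(seq)'; A raises AssertionError elsewhere.
def Pre_rooster (grootte : Int) (seq : List Int) : Prop := grootte ^ 2 = (seq.length : Int)
instance (grootte : Int) (seq : List Int) : Decidable (Pre_rooster grootte seq) := by unfold Pre_rooster; infer_instance

def pvWitness_rooster : Int × List Int := (2, [1, 2, 3, 4])

def Spec_rooster (grootte : Int) (seq : List Int) (out : List (List Int)) : Prop := out = rooster_alt grootte seq
instance (grootte : Int) (seq : List Int) (out : List (List Int)) : Decidable (Spec_rooster grootte seq out) := by unfold Spec_rooster; infer_instance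

-- ===== CLAIM (what is proved, stated in full; the proofs are below) =====
def Claim_equal_rooster : Prop := ∀ (grootte : Int) (seq : List Int), Dom_rooster grootte seq → Pre_rooster grootte seq → Spec_rooster grootte seq (rooster grootte seq)

-- ===== LEMMAS AND PROOFS =====

-- A's loop: appending the slice at i and advancing i by d yields the list of slices at i, i+d, …
lemma rooster_loop (seq : List Int) (d : Int) :
    ∀ (l : List Unit) (acc : List (List Int)) (i : Int),
      l.foldl (fun (s : List (List Int) × Int) _ =>
          (s.1 ++ [PySem.List.slice seq (some s.2) (some (s.2 + d))], s.2 + d)) (acc, i)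
      = (acc ++ (List.range l.length).map
            (fun (j : Nat) => PySem.List.slice seq (some (i + (j : Int) * d)) (some (i + (j : Int) * d + d))),
         i + l.length * d) := by
  intro l
  induction l with
  | nil => intro acc i; simp
  | cons _ t ih =>
    intro acc i
    simp only [List.foldl_cons, ih, List.length_cons]
    rw [List.range_succ_eq_map]
    simp only [Prod.mk.injEq]
    refine ⟨?_, ?_⟩
    · simp only [List.map_cons, List.map_map, List.append_assoc, List.singleton_append,
        Nat.cast_zero, zero_mul, add_zero]
      congr 1
      congr 1
      apply List.map_congr_left
      intro j _
      simp only [Function.comp, Nat.succ_eq_add_one]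
      congr 2 <;> push_cast <;> ring
    · push_cast; ring

-- the foldl in rooster ignores its element, so foldl over any list only depends on its length
lemma foldl_const_of_ignore {α β : Type} (f : β → β) (l : List α) (b : β) :
    l.foldl (fun s _ => f s) b = (List.replicate l.length ()).foldl (fun s _ => f s) b := by
  induction l generalizing b with
  | nil => rfl
  | cons _ t ih => simpa using ih (f b)

-- B's chunking equals the map of drop/take blocks when the length is a multiple of g
lemma chunksB_eq (g : Nat) (hg : 0 < g) :
    ∀ (m : Nat) (xs : List Int), xs.length = m * g →
      chunksB g xs = (List.range m).map (fun j => (xs.drop (j * g)).take g) := by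
  intro m
  induction m with
  | zero =>
    intro xs hlen
    rw [chunksB]
    simp only [List.range_zero, List.map_nil]
    rw [dif_neg]
    omega
  | succ m ih =>
    intro xs hlen
    rw [chunksB, dif_pos ⟨hg, by rw [hlen]; exact Nat.le_mul_of_pos_left g (by omega)⟩]
    rw [ih (xs.drop g) (by simp [hlen, Nat.succ_mul])]
    rw [List.range_succ_eq_map]
    simp only [List.map_cons, List.map_map, zero_mul, List.drop_zero]
    congr 1
    apply List.map_congr_left
    intro j _
    simp only [Function.comp, List.drop_drop]
    congr 2
    simp [Nat.succ_eq_add_one]; ring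

-- ===== VERDICT (by name: the statement is the Claim_ definition above) =====
theorem rooster_spec : Claim_equal_rooster := by
  intro grootte seq _ hpre
  unfold Spec_rooster rooster rooster_alt
  by_cases hg : grootte ≤ 0
  · -- range(grootte) is empty; and grootte.toNat = 0 makes chunksB return []
    rw [PySem.List.pyRange_one_eq_nil (by omega)]
    have : grootte.toNat = 0 := by omega
    rw [this, chunksB, dif_neg (by omega)]
    simp
  · replace hg : 0 < grootte := by omega
    set g : Nat := grootte.toNat with hgdef
    have hgc : (g : Int) = grootte := Int.toNat_of_nonneg (le_of_lt hg)
    have hlen : seq.length = g * g := by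
      have : (seq.length : Int) = (g : Int) * (g : Int) := by
        rw [hgc, ← hpre]; ring
      exact_mod_cast this
    have hd : PySem.Int.floordiv (seq.length : Int) grootte = (g : Int) := by
      rw [hlen, ← hgc]
      push_cast
      exact_mod_cast PySem.Int.floordiv_natCast (g * g) g |>.trans (by
        rw [Nat.mul_div_cancel_left _ (by omega)])
    simp only [hd]
    have hrange : (PySem.List.pyRange 0 grootte 1).length = g := by
      rw [PySem.List.length_pyRange_one]; omega
    -- turn A's fold over pyRange into a fold over replicate, then apply rooster_loop
    have hfold := foldl_const_of_ignore
      (fun (s : List (List Int) × Int) =>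
        (s.1 ++ [PySem.List.slice seq (some s.2) (some (s.2 + (g : Int)))], s.2 + (g : Int)))
      (PySem.List.pyRange 0 grootte 1) (([] : List (List Int)), (0 : Int))
    rw [hfold, rooster_loop seq (g : Int) (List.replicate (PySem.List.pyRange 0 grootte 1).length ())]
    rw [chunksB_eq g (by omega) g seq hlen]
    simp only [List.length_replicate, hrange, List.nil_append, List.map_map]
    apply List.map_congr_left
    intro j hj
    simp only [Function.comp, zero_add]
    rw [List.mem_range] at hj
    have h1 : (j : Int) * (g : Int) = ((j * g : Nat) : Int) := by push_cast; ring
    rw [h1, PySem.List.slice_natCast_add]
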